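-- pv_equiv track=rewrite | github.com/saludxtecnologica-lang/MVP-gesti-n-de-camas-inteligente | backend/app/utils/validators.py | formatear_run
-- ===== SOURCE A (Python) =====
-- def formatear_run(run: str) -> str:
--     """
--     Formatea RUN con puntos y guión.
--
--     Args:
--         run: RUN sin formato
--
--     Returns:
--         RUN formateado (ej: "12.345.678-9")
--     """
--     # Limpiar
--     cleaned = run.replace(".", "").replace("-", "").replace(" ", "").upper()
--
--     if len(cleaned) < 2:
--         return cleaned
--
--     dv = cleaned[-1]
--     numbers = cleaned[:-1]
--
--     # Agregar puntos
--     formatted = ""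
--     for i, digit in enumerate(reversed(numbers)):
--         if i > 0 and i % 3 == 0:
--             formatted = "." + formatted
--         formatted = digit + formatted
--
--     return f"{formatted}-{dv}"
-- ===== SOURCE B (Python) =====
-- def formatear_run(run: str) -> str:
--     """Formatea RUN con puntos y guion (ej: "12.345.678-9")."""
--     cleaned = run.replace(".", "").replace("-", "").replace(" ", "").upper()
--
--     if len(cleaned) < 2:
--         return cleaned
--
--     dv = cleaned[-1]
--     numbers = cleaned[:-1]
--
--     # Chunk the number part in groups of three from the right, then join.
--     groups = []
--     while len(numbers) > 3:
--         groups.append(numbers[-3:])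
--         numbers = numbers[:-3]
--     groups.append(numbers)
--
--     return ".".join(reversed(groups)) + "-" + dv
-- ===== Notes on version B (the rewrite author's own statement) =====
-- stated objective: simpler
-- what changed: Replaces the reversed per-character loop with index-modulo dot insertion by slicing three-character groups off the right and joining the groups with dots; fewer, larger string operations (slice per 3 chars plus one join) instead of two string reallocations per character.
import Mathlib
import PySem

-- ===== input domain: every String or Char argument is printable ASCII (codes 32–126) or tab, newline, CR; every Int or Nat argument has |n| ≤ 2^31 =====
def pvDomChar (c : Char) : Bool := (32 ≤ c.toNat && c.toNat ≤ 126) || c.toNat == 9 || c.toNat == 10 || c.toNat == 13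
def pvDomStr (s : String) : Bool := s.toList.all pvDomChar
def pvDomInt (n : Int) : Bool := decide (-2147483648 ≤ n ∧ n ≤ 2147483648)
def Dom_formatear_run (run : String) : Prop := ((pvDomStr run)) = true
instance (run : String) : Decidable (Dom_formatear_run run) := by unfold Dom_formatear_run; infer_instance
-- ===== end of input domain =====

-- B groups the digits by slicing three characters off the right in a loop and joining the
-- groups with dots, instead of A's reversed per-character loop with index-modulo dot insertion
-- (objective: simpler).

-- shared cleaning step (textually identical first line of both Pythons):
-- run.replace(".", "").replace("-", "").replace(" ", "").upper()
def pvClean (run : String) : List Char :=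
  PySem.Chars.upper
    (PySem.Chars.replace
      (PySem.Chars.replace
        (PySem.Chars.replace run.toList ['.'] [])
        ['-'] [])
      [' '] [])

-- ===== PORT A =====
-- loop body: if i > 0 and i % 3 == 0: formatted = "." + formatted; formatted = digit + formatted
def pvStepA (f : List Char) (p : Int × Char) : List Char :=
  p.2 :: (if 0 < p.1 ∧ PySem.Int.mod p.1 3 = 0 then '.' :: f else f)

def formatear_run (run : String) : String :=
  let cleaned := pvClean run
  if cleaned.length < 2 then String.ofList cleaned
  else
    let dv := PySem.List.pyGetD cleaned (-1) ' '
    let numbers := PySem.List.slice cleaned none (some (-1))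
    let formatted := (PySem.List.enumerate numbers.reverse 0).foldl pvStepA []
    String.ofList (formatted ++ '-' :: [dv])

-- ===== PORT B =====
-- the while loop of Source B: groups in append order (last three first), leftover group last
def pvGroupsB (ns : List Char) : List (List Char) :=
  if h : 3 < ns.length then
    PySem.List.slice ns (some (-3)) none :: pvGroupsB (PySem.List.slice ns none (some (-3)))
  else [ns]
termination_by ns.length
decreasing_by
  rw [PySem.List.slice_to_neg_ofNat ns 3 (by omega)]
  simp; omega

def formatear_run_alt (run : String) : String :=
  let cleaned := pvClean run
  if cleaned.length < 2 then String.ofList cleaned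
  else
    let dv := PySem.List.pyGetD cleaned (-1) ' '
    let numbers := PySem.List.slice cleaned none (some (-1))
    let groups := pvGroupsB numbers
    String.ofList (PySem.Chars.join ['.'] groups.reverse ++ '-' :: [dv])

-- ===== PRECONDITION & SPEC =====
def Spec_formatear_run (run : String) (out : String) : Prop := out = formatear_run_alt run
instance (run : String) (out : String) : Decidable (Spec_formatear_run run out) := by unfold Spec_formatear_run; infer_instance

-- ===== CLAIM (what is proved, stated in full; the proofs are below) =====
def Claim_equal_formatear_run : Prop := ∀ (run : String), Dom_formatear_run run → Spec_formatear_run run (formatear_run run)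

-- ===== LEMMAS AND PROOFS =====

-- closed form of A's fold over the enumerated reversed digits, starting at index k
def pvH (l : List Char) (k : Int) : List Char :=
  match l with
  | [] => []
  | d :: rest =>
      pvH rest (k + 1) ++ d :: (if 0 < k ∧ PySem.Int.mod k 3 = 0 then ['.'] else [])

theorem pvH_foldl (l : List Char) : ∀ (k : Int) (s : List Char),
    (PySem.List.enumerate l k).foldl pvStepA s = pvH l k ++ s := by
  induction l with
  | nil => intro k s; simp [PySem.List.enumerate_nil, pvH]
  | cons d rest ih =>
      intro k s
      simp only [PySem.List.enumerate_cons, List.foldl_cons, ih, pvH, pvStepA]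
      split_ifs <;> simp

theorem pvH_shift (l : List Char) : ∀ k : Int, 1 ≤ k → pvH l (k + 3) = pvH l k := by
  induction l with
  | nil => intro k _; rfl
  | cons d rest ih =>
      intro k hk
      show pvH rest (k + 3 + 1) ++ _ = pvH rest (k + 1) ++ _
      have h1 : (k + 3 + 1) = (k + 1) + 3 := by ring
      rw [h1, ih (k + 1) (by omega)]
      have h2 : (0 < k + 3 ∧ PySem.Int.mod (k + 3) 3 = 0) ↔ (0 < k ∧ PySem.Int.mod k 3 = 0) := by
        simp only [PySem.Int.mod_eq_zero_iff_dvd]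
        constructor
        · rintro ⟨-, h⟩; exact ⟨by omega, by omega⟩
        · rintro ⟨-, h⟩; exact ⟨by omega, by omega⟩
      rw [if_congr h2 rfl rfl]

theorem pvH_three (l : List Char) (h : l ≠ []) : pvH l 3 = pvH l 0 ++ ['.'] := by
  cases l with
  | nil => exact absurd rfl h
  | cons d rest =>
      show pvH rest (3 + 1) ++ _ = (pvH rest (0 + 1) ++ _) ++ _
      have : (3 : Int) + 1 = (0 + 1) + 3 := by ring
      rw [this, pvH_shift rest (0 + 1) (by omega)]
      norm_num [PySem.Int.mod_eq_zero_iff_dvd]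

theorem pvJoin_append_singleton (sep g : List Char) :
    ∀ gs : List (List Char), gs ≠ [] →
    PySem.Chars.join sep (gs ++ [g]) = PySem.Chars.join sep gs ++ sep ++ g := by
  intro gs
  induction gs with
  | nil => intro h; exact absurd rfl h
  | cons x t ih =>
      intro _
      cases t with
      | nil => simp [PySem.Chars.join_cons_cons, PySem.Chars.join_singleton]
      | cons y t' =>
          have := ih (by simp)
          simp only [List.cons_append, PySem.Chars.join_cons_cons] at *
          rw [this]; simp

theorem pvGroupsB_ne_nil (ns : List Char) : pvGroupsB ns ≠ [] := by
  rw [pvGroupsB]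
  split_ifs <;> simp

theorem pvH_eq_join (ns : List Char) :
    pvH ns.reverse 0 = PySem.Chars.join ['.'] (pvGroupsB ns).reverse := by
  induction hn : ns.length using Nat.strong_induction_on generalizing ns with
  | _ n ih =>
  by_cases h3 : 3 < ns.length
  · -- split off the last three characters
    have hx : ns = ns.take (ns.length - 3) ++ ns.drop (ns.length - 3) := (List.take_append_drop _ _).symm
    have hlen : (ns.drop (ns.length - 3)).length = 3 := by simp; omega
    obtain ⟨a, b, c, habc⟩ : ∃ a b c, ns.drop (ns.length - 3) = [a, b, c] :=
      List.length_eq_three.mp hlen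
    set xs := ns.take (ns.length - 3) with hxs
    have hxlen : xs.length = ns.length - 3 := by simp [hxs]
    have hxne : xs ≠ [] := by
      intro h; rw [h] at hxlen; simp at hxlen
      omega
    have hrev : ns.reverse = c :: b :: a :: xs.reverse := by
      conv_lhs => rw [hx, habc]
      simp
    -- A side
    have hA : pvH ns.reverse 0 = ((pvH xs.reverse 0 ++ ['.']) ++ [a] ++ [b]) ++ [c] := by
      rw [hrev]
      show pvH (b :: a :: xs.reverse) (0 + 1) ++ _ = _
      show (pvH (a :: xs.reverse) (0 + 1 + 1) ++ _) ++ _ = _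
      show ((pvH xs.reverse (0 + 1 + 1 + 1) ++ _) ++ _) ++ _ = _
      have h0 : (0 : Int) + 1 + 1 + 1 = 3 := by ring
      rw [h0, pvH_three xs.reverse (by simpa using hxne)]
      simp
    -- B side
    have hB : pvGroupsB ns = ns.drop (ns.length - 3) :: pvGroupsB xs := by
      rw [pvGroupsB, dif_pos h3,
        PySem.List.slice_from_neg_ofNat ns 3 (by omega),
        PySem.List.slice_to_neg_ofNat ns 3 (by omega)]
    have hIH : pvH xs.reverse 0 = PySem.Chars.join ['.'] (pvGroupsB xs).reverse := by
      exact ih xs.length (by omega) xs rfl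
    rw [hA, hIH, hB, habc]
    rw [List.reverse_cons,
      pvJoin_append_singleton ['.'] [a, b, c] _ (by simp [pvGroupsB_ne_nil])]
    simp
  · -- at most three characters: no dot is inserted and there is a single group
    have hB : pvGroupsB ns = [ns] := by rw [pvGroupsB, dif_neg h3]
    rw [hB]
    rcases ns with _ | ⟨a, _ | ⟨b, _ | ⟨c, _ | ⟨d, t⟩⟩⟩⟩
    · rfl
    · simp [pvH, PySem.Chars.join_singleton]
    · simp [pvH, PySem.Chars.join_singleton]
    · simp [pvH, PySem.Chars.join_singleton]
    · exact absurd (by simp) h3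

-- ===== VERDICT (by name: the statement is the Claim_ definition above) =====
theorem formatear_run_spec : Claim_equal_formatear_run := by
  intro run _
  show formatear_run run = formatear_run_alt run
  unfold formatear_run formatear_run_alt
  by_cases h : (pvClean run).length < 2
  · simp [h]
  · simp only [h, if_false]
    rw [pvH_foldl, List.append_nil, pvH_eq_join]
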